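-- pv_equiv track=rewrite | github.com/pypi-data/pypi-mirror-403 | packages/edwh-server-provisioning-plugin/edwh_server_provisioning_plugin-0.8.0-py3-none-any.whl/edwh_server_provisioning_plugin/server_provisioning_plugin.py | at_least
-- ===== SOURCE A (Python) =====
-- import typing
--
-- def at_least(iterable: typing.Iterable, n: int):
--     """
--     Like 'all()' or 'any()' but for at least 'n'
--
--     https://stackoverflow.com/questions/42514445/clever-any-like-function-to-check-if-at-least-n-elements-are-true
--     """
--     if n < 1:
--         return True
--     counter = 0
--     for x in iterable:
--         if x:
--             counter += 1
--             if counter == n: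
--                 return True
--     return False
-- ===== SOURCE B (Python) =====
-- def at_least(iterable, n: int):
--     """Like 'all()'/'any()' but for at least n truthy elements.
--
--     Staged-pass decomposition: count every truthy element with
--     sum(map(bool, ...)) and compare the total against n, instead of
--     maintaining a running counter with an early return.
--     """
--     return n < 1 or sum(map(bool, iterable)) >= n
-- ===== Notes on version B (the rewrite author's own statement) =====
-- stated objective: simpler
-- what changed: Replaces A's stateful loop (running counter, early return once the counter reaches n) with a one-line staged pipeline: count all truthy elements via sum(map(bool, iterable)) and compare the total to n, with no early exit and no mutable state.
import Mathlib
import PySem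

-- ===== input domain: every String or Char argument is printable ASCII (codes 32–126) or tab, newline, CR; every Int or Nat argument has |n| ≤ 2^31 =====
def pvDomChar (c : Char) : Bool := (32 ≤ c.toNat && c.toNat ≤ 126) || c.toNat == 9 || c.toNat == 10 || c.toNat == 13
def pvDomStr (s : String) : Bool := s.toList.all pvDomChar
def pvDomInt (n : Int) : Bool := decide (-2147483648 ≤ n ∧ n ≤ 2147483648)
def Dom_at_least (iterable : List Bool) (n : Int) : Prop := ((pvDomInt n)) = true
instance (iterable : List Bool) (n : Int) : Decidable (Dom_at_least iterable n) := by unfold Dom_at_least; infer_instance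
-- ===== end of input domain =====

-- B replaces A's counter loop with early return by a staged pipeline: count all truthy elements with a fold and compare the total to n (simpler; same cost).
-- ===== PORT A =====
-- loop over the iterable carrying the counter, with early return at counter == n
def atLeastLoop (xs : List Bool) (counter n : Int) : Bool :=
  match xs with
  | [] => false
  | x :: rest =>
    if x then
      if counter + 1 == n then true else atLeastLoop rest (counter + 1) n
    else atLeastLoop rest counter n

def at_least (iterable : List Bool) (n : Int) : Bool :=
  if n < 1 then true else atLeastLoop iterable 0 n

-- ===== PORT B =====
-- n < 1 or sum(map(bool, iterable)) >= n  (sum ported as a left fold, Python's sum)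
def at_least_alt (iterable : List Bool) (n : Int) : Bool :=
  decide (n < 1) ||
    decide (n ≤ (iterable.map (fun x => if x then (1 : Int) else 0)).foldl (· + ·) 0)

-- ===== PRECONDITION & SPEC =====
def Spec_at_least (iterable : List Bool) (n : Int) (out : Bool) : Prop := out = at_least_alt iterable n
instance (iterable : List Bool) (n : Int) (out : Bool) : Decidable (Spec_at_least iterable n out) := by unfold Spec_at_least; infer_instance

-- ===== CLAIM (what is proved, stated in full; the proofs are below) =====
def Claim_equal_at_least : Prop := ∀ (iterable : List Bool) (n : Int), Dom_at_least iterable n → Spec_at_least iterable n (at_least iterable n)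

-- ===== LEMMAS AND PROOFS =====
-- A's counter loop answers whether at least n - counter truthy elements remain
theorem atLeastLoop_eq (xs : List Bool) (n : Int) : ∀ c : Int, c < n →
    atLeastLoop xs c n = decide (n - c ≤ ((xs.filter id).length : Int)) := by
  induction xs with
  | nil =>
    intro c hc
    simp [atLeastLoop]; omega
  | cons x rest ih =>
    intro c hc
    cases x with
    | true =>
      by_cases h : c + 1 = n
      · simp [atLeastLoop, h]
        have : (n : Int) - c = 1 := by omega
        simp [this]
        omega
      · have hlt : c + 1 < n := by omega
        simp [atLeastLoop, h, ih (c + 1) hlt]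
        constructor <;> intro <;> omega
    | false =>
      simp [atLeastLoop, ih c hc]

-- B's fold computes the number of truthy elements
theorem altSum_eq (xs : List Bool) : ∀ a : Int,
    (xs.map (fun x => if x then (1 : Int) else 0)).foldl (· + ·) a
      = a + ((xs.filter id).length : Int) := by
  induction xs with
  | nil => intro a; simp
  | cons x rest ih =>
    intro a
    cases x <;> simp [List.foldl, ih] <;> push_cast <;> ring

theorem at_least_spec : Claim_equal_at_least := by
  intro iterable n _
  unfold Spec_at_least at_least at_least_alt
  rw [altSum_eq iterable 0]
  by_cases h : n < 1
  · simp [h]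
  · simp only [h, decide_false, Bool.false_or, if_false]
    rw [atLeastLoop_eq iterable n 0 (by omega)]
    simp only [sub_zero, zero_add]
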